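-- pv_equiv track=rewrite | github.com/rahulmedhe05/Interiara | scripts/add-seo-metadata.py | extract_service_and_city
-- ===== SOURCE A (Python) =====
-- CITY_DISPLAY_NAMES = {
--     "downtown-dubai": "Downtown Dubai",
--     "business-bay": "Business Bay",
--     "dubai-marina": "Dubai Marina",
--     "palm-jumeirah": "Palm Jumeirah",
--     "jumeirah": "Jumeirah",
--     "jbr": "JBR",
--     "dubai-hills-estate": "Dubai Hills Estate",
--     "arabian-ranches": "Arabian Ranches",
--     "al-wasl": "Al Wasl",
--     "dubai-creek-harbour": "Dubai Creek Harbour",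
--     "jlt": "JLT",
--     "al-barsha": "Al Barsha",
--     "dubai-festival-city": "Dubai Festival City",
--     "city-walk": "City Walk",
--     "umm-suqeim": "Umm Suqeim",
--     "al-safa": "Al Safa",
--     "meadows": "Meadows",
--     "springs": "Springs",
--     "the-villa": "The Villa",
--     "nad-al-sheba": "Nad Al Sheba",
--     "jvc": "JVC",
--     "jvt": "JVT",
--     "dubai-sports-city": "Dubai Sports City",
--     "town-square": "Town Square",
--     "dubai-south": "Dubai South",
--     "al-furjan": "Al Furjan",
--     "al-quoz": "Al Quoz",
--     "mirdif": "Mirdif",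
--     "dubai-design-district": "Dubai Design District",
--     "dubai-land": "Dubai Land",
-- }
--
-- def extract_service_and_city(dir_name):
--     """Extract service and city from directory name"""
--     if dir_name.endswith("-dubai"):
--         dir_name = dir_name[:-6]
--
--     # Try to find city (longest match first)
--     sorted_cities = sorted(CITY_DISPLAY_NAMES.keys(), key=len, reverse=True)
--
--     for city in sorted_cities:
--         if dir_name.endswith("-" + city):
--             service = dir_name[:-len(city)-1]
--             return service, city
--         elif dir_name == city:
--             return "", city
--
--     return None, None
-- ===== SOURCE B (Python) =====
-- CITY_DISPLAY_NAMES = {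
--     "downtown-dubai": "Downtown Dubai",
--     "business-bay": "Business Bay",
--     "dubai-marina": "Dubai Marina",
--     "palm-jumeirah": "Palm Jumeirah",
--     "jumeirah": "Jumeirah",
--     "jbr": "JBR",
--     "dubai-hills-estate": "Dubai Hills Estate",
--     "arabian-ranches": "Arabian Ranches",
--     "al-wasl": "Al Wasl",
--     "dubai-creek-harbour": "Dubai Creek Harbour",
--     "jlt": "JLT",
--     "al-barsha": "Al Barsha",
--     "dubai-festival-city": "Dubai Festival City",
--     "city-walk": "City Walk",
--     "umm-suqeim": "Umm Suqeim",
--     "al-safa": "Al Safa",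
--     "meadows": "Meadows",
--     "springs": "Springs",
--     "the-villa": "The Villa",
--     "nad-al-sheba": "Nad Al Sheba",
--     "jvc": "JVC",
--     "jvt": "JVT",
--     "dubai-sports-city": "Dubai Sports City",
--     "town-square": "Town Square",
--     "dubai-south": "Dubai South",
--     "al-furjan": "Al Furjan",
--     "al-quoz": "Al Quoz",
--     "mirdif": "Mirdif",
--     "dubai-design-district": "Dubai Design District",
--     "dubai-land": "Dubai Land",
-- }
--
-- def extract_service_and_city(dir_name):
--     """Extract service and city from directory name"""
--     if dir_name.endswith("-dubai"):
--         dir_name = dir_name[:-6]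
--     # Scan dash boundaries left to right: the first suffix that is a known
--     # city key is the longest one, so no sort over the key set is needed.
--     for i in range(len(dir_name)):
--         if i == 0 or dir_name[i - 1] == "-":
--             cand = dir_name[i:]
--             if cand in CITY_DISPLAY_NAMES:
--                 return (dir_name[:i - 1] if i else "", cand)
--     return None, None
-- ===== Notes on version B (the rewrite author's own statement) =====
-- stated objective: alternative
-- what changed: Instead of sorting all 30 city keys by length and scanning them with endswith per key, B walks the dash boundaries of the (dubai-stripped) directory name left to right and tests each suffix with one O(1) dict membership check, returning on the first hit, which is automatically the longest matching city.
import Mathlib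
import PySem

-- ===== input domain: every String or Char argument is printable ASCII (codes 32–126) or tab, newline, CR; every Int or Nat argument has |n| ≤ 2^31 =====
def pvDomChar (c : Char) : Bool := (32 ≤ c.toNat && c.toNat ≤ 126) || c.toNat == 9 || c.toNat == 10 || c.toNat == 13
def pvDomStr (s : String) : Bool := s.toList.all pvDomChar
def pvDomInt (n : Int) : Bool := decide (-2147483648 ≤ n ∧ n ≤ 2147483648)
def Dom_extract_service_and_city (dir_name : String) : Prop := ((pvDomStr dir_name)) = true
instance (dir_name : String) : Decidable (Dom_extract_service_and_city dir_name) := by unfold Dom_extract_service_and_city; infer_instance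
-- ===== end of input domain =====

-- Alternative algorithm: B replaces A's sort-the-30-keys-and-endswith-scan by a single left-to-right
-- walk over the dash boundaries of the (dubai-stripped) name, testing each suffix with one dict
-- membership check; the first hit is the longest matching city, so no sort is needed.

-- ===== PORT A =====
-- the module constant CITY_DISPLAY_NAMES (shared by both versions)
def pvCityDict : PySem.Dict String String := PySem.Dict.mk [
  ("downtown-dubai", "Downtown Dubai"), ("business-bay", "Business Bay"),
  ("dubai-marina", "Dubai Marina"), ("palm-jumeirah", "Palm Jumeirah"),
  ("jumeirah", "Jumeirah"), ("jbr", "JBR"),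
  ("dubai-hills-estate", "Dubai Hills Estate"), ("arabian-ranches", "Arabian Ranches"),
  ("al-wasl", "Al Wasl"), ("dubai-creek-harbour", "Dubai Creek Harbour"),
  ("jlt", "JLT"), ("al-barsha", "Al Barsha"),
  ("dubai-festival-city", "Dubai Festival City"), ("city-walk", "City Walk"),
  ("umm-suqeim", "Umm Suqeim"), ("al-safa", "Al Safa"),
  ("meadows", "Meadows"), ("springs", "Springs"),
  ("the-villa", "The Villa"), ("nad-al-sheba", "Nad Al Sheba"),
  ("jvc", "JVC"), ("jvt", "JVT"),
  ("dubai-sports-city", "Dubai Sports City"), ("town-square", "Town Square"),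
  ("dubai-south", "Dubai South"), ("al-furjan", "Al Furjan"),
  ("al-quoz", "Al Quoz"), ("mirdif", "Mirdif"),
  ("dubai-design-district", "Dubai Design District"), ("dubai-land", "Dubai Land")]

-- A's 'for city in sorted_cities' loop with its two early returns
def pvALoop (d : String) : List String → Option String × Option String
  | [] => (none, none)
  | city :: rest =>
    if PySem.Str.endswith d ("-" ++ city) then
      (some (PySem.Str.slice d none (some (-(PySem.Str.len city) - 1))), some city)
    else if d == city then
      (some "", some city)
    else pvALoop d rest

def extract_service_and_city (dir_name : String) : Option String × Option String :=
  let d := if PySem.Str.endswith dir_name "-dubai" then PySem.Str.slice dir_name none (some (-6)) else dir_name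
  pvALoop d (PySem.List.sorted pvCityDict.keys (fun c => PySem.Str.len c) true)

-- ===== PORT B =====
-- B's 'for i in range(len(dir_name))' loop with its early return
def pvBLoop (d : String) : List Int → Option String × Option String
  | [] => (none, none)
  | i :: rest =>
    if i == 0 || PySem.Str.pyGet? d (i - 1) == some '-' then
      let cand := PySem.Str.slice d (some i) none
      if pvCityDict.contains cand then
        ((if i == 0 then some "" else some (PySem.Str.slice d none (some (i - 1)))), some cand)
      else pvBLoop d rest
    else pvBLoop d rest

def extract_service_and_city_alt (dir_name : String) : Option String × Option String :=
  let d := if PySem.Str.endswith dir_name "-dubai" then PySem.Str.slice dir_name none (some (-6)) else dir_name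
  pvBLoop d (PySem.List.pyRange 0 (PySem.Str.len d) 1)

-- ===== PRECONDITION & SPEC =====
def Spec_extract_service_and_city (dir_name : String) (out : Option String × Option String) : Prop := out = extract_service_and_city_alt dir_name
instance (dir_name : String) (out : Option String × Option String) : Decidable (Spec_extract_service_and_city dir_name out) := by unfold Spec_extract_service_and_city; infer_instance

-- ===== CLAIM (what is proved, stated in full; the proofs are below) =====
def Claim_equal_extract_service_and_city : Prop := ∀ (dir_name : String), Dom_extract_service_and_city dir_name → Spec_extract_service_and_city dir_name (extract_service_and_city dir_name)

-- ===== LEMMAS AND PROOFS =====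

-- "city matches the (stripped) name d": A's two tests merged into one Bool
def pvMatch (cs : List Char) (c : String) : Bool :=
  PySem.Chars.endswith cs ('-' :: c.toList) || cs == c.toList

-- A's per-city output
def pvAOut (d : String) (c : String) : Option String × Option String :=
  if PySem.Chars.endswith d.toList ('-' :: c.toList) then
    (some (PySem.Str.slice d none (some (-(PySem.Str.len c) - 1))), some c)
  else (some "", some c)

-- B's per-index predicate and output
def pvQ (d : String) (i : Int) : Bool :=
  (i == 0 || PySem.Str.pyGet? d (i - 1) == some '-') && pvCityDict.contains (PySem.Str.slice d (some i) none)

def pvBOut (d : String) (i : Int) : Option String × Option String :=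
  ((if i == 0 then some "" else some (PySem.Str.slice d none (some (i - 1)))),
   some (PySem.Str.slice d (some i) none))

-- the key list
def pvKeys : List String := pvCityDict.keys

lemma pvALoop_eq_find (d : String) (l : List String) :
    pvALoop d l = match l.find? (pvMatch d.toList) with
      | some c => pvAOut d c
      | none => (none, none) := by
  induction l with
  | nil => rfl
  | cons city rest ih =>
    have hend : PySem.Str.endswith d ("-" ++ city)
        = PySem.Chars.endswith d.toList ('-' :: city.toList) := by
      rw [PySem.Str.endswith_eq, String.toList_append]; rfl
    have heq : (d == city) = (d.toList == city.toList) := by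
      simp [String.toList_inj]
    simp only [pvALoop, List.find?, pvMatch, hend, heq]
    by_cases h1 : PySem.Chars.endswith d.toList ('-' :: city.toList) = true
    · simp [h1, pvAOut]
    · simp only [Bool.not_eq_true] at h1
      by_cases h2 : d.toList = city.toList
      · simp [h2, pvAOut]
      · have h2' : (d.toList == city.toList) = false := by simp [h2]
        simp [h1, h2', ih]

lemma pvBLoop_eq_find (d : String) (l : List Int) :
    pvBLoop d l = match l.find? (pvQ d) with
      | some i => pvBOut d i
      | none => (none, none) := by
  induction l with
  | nil => rfl
  | cons i rest ih =>
    simp only [pvBLoop, List.find?, pvQ, PySem.Str.pyGet?_eq,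
      PySem.Chars.pyGet?_eq_listPyGet?]
    by_cases hb : (i == 0 || PySem.List.pyGet? d.toList (i - 1) == some '-') = true
    · by_cases hm : pvCityDict.contains (PySem.Str.slice d (some i) none) = true
      · simp [hb, hm, pvBOut]
      · simp only [Bool.not_eq_true] at hm
        simp [hb, hm, ih]
    · simp only [Bool.not_eq_true] at hb
      simp [hb, ih]

-- every key is a nonempty string
lemma pvKeys_ne_nil : ∀ c ∈ pvKeys, c.toList ≠ [] := by decide

-- membership in the dict is membership in pvKeys
lemma pvContains_eq (c : String) : pvCityDict.contains c = decide (c ∈ pvKeys) :=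
  PySem.Dict.contains_eq_decide_mem_keys pvCityDict c

-- a match forces the candidate to be the suffix of d of its own length
lemma pvMatch_drop {cs : List Char} {c : String} (h : pvMatch cs c = true) :
    c.toList.length ≤ cs.length ∧ c.toList = cs.drop (cs.length - c.toList.length) := by
  have hsuf : c.toList <:+ cs := by
    rcases Bool.or_eq_true_iff.mp h with h1 | h2
    · have := (PySem.Chars.endswith_iff _ _).mp h1
      exact (List.suffix_cons _ _).trans this
    · have : cs = c.toList := by simpa using h2
      simp [this]
  exact ⟨hsuf.length_le, List.suffix_iff_eq_drop.mp hsuf⟩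

-- B's test at i implies a match of the corresponding suffix (0 ≤ i < len)
lemma pvQ_match (d : String) (i : Int) (h0 : 0 ≤ i) (hn : i < d.toList.length)
    (hq : pvQ d i = true) :
    (PySem.Str.slice d (some i) none) ∈ pvKeys ∧
    pvMatch d.toList (PySem.Str.slice d (some i) none) = true ∧
    (PySem.Str.slice d (some i) none).toList = d.toList.drop i.toNat := by
  have htl : (PySem.Str.slice d (some i) none).toList = d.toList.drop i.toNat := by
    rw [PySem.Str.toList_slice, PySem.Chars.slice_eq_listSlice, PySem.List.slice_from _ h0]
  rw [pvQ] at hq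
  rcases Bool.and_eq_true_iff.mp hq with ⟨hbd, hct⟩
  refine ⟨?_, ?_, htl⟩
  · rw [pvContains_eq] at hct; exact of_decide_eq_true hct
  · by_cases hi : i = 0
    · apply Bool.or_eq_true_iff.mpr; right
      simp [hi]
    · have hdash : PySem.Str.pyGet? d (i - 1) == some '-' := by
        rcases Bool.or_eq_true_iff.mp hbd with hz | hdash
        · exact absurd (by simpa using hz) hi
        · exact hdash
      rw [PySem.Str.pyGet?_eq, PySem.Chars.pyGet?_eq_listPyGet?] at hdash
      have hi1 : (1 : Int) ≤ i := by omega
      have hk : i - 1 = ((i.toNat - 1 : Nat) : Int) := by omega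
      rw [hk, PySem.List.pyGet?_natCast] at hdash
      have hget : d.toList[i.toNat - 1]? = some '-' := by simpa using hdash
      have hlt : i.toNat - 1 < d.toList.length := by
        by_contra hge
        rw [List.getElem?_eq_none (by omega)] at hget; exact (by simp at hget)
      apply Bool.or_eq_true_iff.mpr; left
      rw [htl, PySem.Chars.endswith_iff]
      have hd : d.toList.drop (i.toNat - 1)
          = d.toList[i.toNat - 1] :: d.toList.drop (i.toNat - 1 + 1) :=
        List.drop_eq_getElem_cons hlt
      have hv : d.toList[i.toNat - 1] = '-' := by
        have := List.getElem?_eq_getElem hlt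
        rw [this] at hget; simpa using hget
      have h1 : i.toNat - 1 + 1 = i.toNat := by omega
      rw [hv, h1] at hd
      rw [← hd]
      exact List.drop_suffix _ _

-- a match of a key yields B's test at index (len - |c|)
lemma pvMatch_q (d : String) (c : String) (hc : c ∈ pvKeys) (hm : pvMatch d.toList c = true) :
    pvQ d ((d.toList.length - c.toList.length : Nat) : Int) = true := by
  obtain ⟨hlen, hdrop⟩ := pvMatch_drop hm
  set n := d.toList.length with hn
  set L := c.toList.length with hL
  rw [pvQ]
  apply Bool.and_eq_true_iff.mpr
  constructor
  · by_cases h0 : n - L = 0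
    · apply Bool.or_eq_true_iff.mpr; left; simp [h0]
    · apply Bool.or_eq_true_iff.mpr; right
      have hsuf : ('-' :: c.toList) <:+ d.toList := by
        rcases Bool.or_eq_true_iff.mp hm with h1 | h2
        · exact (PySem.Chars.endswith_iff _ _).mp h1
        · exfalso
          have : d.toList = c.toList := by simpa using h2
          have : n = L := by rw [hn, hL, this]
          omega
      have hL1 : L + 1 ≤ n := by
        have := hsuf.length_le; simpa using this
      have hdrop2 : '-' :: c.toList = d.toList.drop (n - (L + 1)) := by
        have := List.suffix_iff_eq_drop.mp hsuf
        simpa using this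
      have hget : d.toList[n - L - 1]? = some '-' := by
        have : (d.toList.drop (n - (L + 1)))[0]? = some '-' := by
          rw [← hdrop2]; rfl
        rw [List.getElem?_drop] at this
        have he : n - (L + 1) + 0 = n - L - 1 := by omega
        rwa [he] at this
      have hk : ((n - L : Nat) : Int) - 1 = ((n - L - 1 : Nat) : Int) := by omega
      rw [PySem.Str.pyGet?_eq, PySem.Chars.pyGet?_eq_listPyGet?, hk,
        PySem.List.pyGet?_natCast]
      simpa using hget
  · have htl : (PySem.Str.slice d (some ((n - L : Nat) : Int)) none).toList
        = d.toList.drop (n - L) := by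
      rw [PySem.Str.toList_slice, PySem.Chars.slice_eq_listSlice,
        PySem.List.slice_from _ (by omega)]
      simp
    have hcand : PySem.Str.slice d (some ((n - L : Nat) : Int)) none = c := by
      rw [← String.toList_inj, htl, ← hdrop]
    rw [hcand, pvContains_eq]
    exact decide_eq_true hc

-- the two loops agree on every (already dubai-stripped) name d
lemma pvLoops_eq (d : String) :
    pvALoop d (PySem.List.sorted pvCityDict.keys (fun c => PySem.Str.len c) true)
      = pvBLoop d (PySem.List.pyRange 0 (PySem.Str.len d) 1) := by
  have hperm : (PySem.List.sorted pvCityDict.keys (fun c => PySem.Str.len c) true).Perm pvKeys :=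
    PySem.List.sorted_perm _ _ _
  have hpw := PySem.List.sorted_pairwise_rev pvCityDict.keys (fun c => PySem.Str.len c)
  set l := PySem.List.sorted pvCityDict.keys (fun c => PySem.Str.len c) true with hldef
  rw [pvALoop_eq_find, pvBLoop_eq_find]
  cases hfind : l.find? (pvMatch d.toList) with
  | none =>
    have hb : (PySem.List.pyRange 0 (PySem.Str.len d) 1).find? (pvQ d) = none := by
      rw [List.find?_eq_none]
      intro i hi hq
      rw [PySem.List.mem_pyRange_one] at hi
      have hi2 : i < d.toList.length := by
        have := hi.2; rw [PySem.Str.len_eq] at this; exact this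
      obtain ⟨hmem, hm, _⟩ := pvQ_match d i hi.1 hi2 hq
      exact (List.find?_eq_none.mp hfind _ (hperm.mem_iff.mpr hmem)) hm
    rw [hb]
  | some c =>
    obtain ⟨hmc, l₁, l₂, hl, hnone⟩ := List.find?_eq_some_iff_append.mp hfind
    have hcK : c ∈ pvKeys := hperm.mem_iff.mp (by rw [hl]; simp)
    obtain ⟨hlen, hdropc⟩ := pvMatch_drop hmc
    set n := d.toList.length with hn
    set L := c.toList.length with hL
    have hLpos : 1 ≤ L := by
      have := pvKeys_ne_nil c hcK
      cases hcl : c.toList with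
      | nil => exact absurd hcl this
      | cons a t => rw [hL, hcl]; simp
    -- every matching key is at most as long as c
    have hmax : ∀ c' ∈ pvKeys, pvMatch d.toList c' = true → c'.toList.length ≤ L := by
      intro c' hc' hm'
      have hc'l : c' ∈ l := hperm.mem_iff.mpr hc'
      rw [hl] at hc'l
      rcases List.mem_append.mp hc'l with h1 | h2
      · exact absurd hm' (by simpa using hnone c' h1)
      · rcases List.mem_cons.mp h2 with he | h2
        · rw [he]
        · rw [hl] at hpw
          have := (List.pairwise_append.mp hpw).2.1
          have hle := (List.pairwise_cons.mp this).1 c' h2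
          rw [PySem.Str.len_eq, PySem.Str.len_eq] at hle
          exact_mod_cast hle
    have hq0 := pvMatch_q d c hcK hmc
    rw [← hn, ← hL] at hq0
    -- B's range finds exactly index n - L
    have hnone' : ∀ j ∈ PySem.List.pyRange 0 ((n - L : Nat) : Int) 1, ¬ pvQ d j = true := by
      intro j hj hq
      rw [PySem.List.mem_pyRange_one] at hj
      have hj2 : j < (n : Int) := by omega
      obtain ⟨hmem, hm, htl⟩ := pvQ_match d j hj.1 (by exact_mod_cast hj2) hq
      have hlencand : (PySem.Str.slice d (some j) none).toList.length = n - j.toNat := by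
        rw [htl, List.length_drop]
      have := hmax _ hmem hm
      rw [hlencand] at this
      omega
    have hfb : (PySem.List.pyRange 0 (PySem.Str.len d) 1).find? (pvQ d)
        = some ((n - L : Nat) : Int) := by
      have hsplit : PySem.List.pyRange 0 (PySem.Str.len d) 1
          = PySem.List.pyRange 0 ((n - L : Nat) : Int) 1
            ++ ((n - L : Nat) : Int) :: PySem.List.pyRange (((n - L : Nat) : Int) + 1) (PySem.Str.len d) 1 := by
        rw [PySem.Str.len_eq, ← hn,
          PySem.List.pyRange_one_append 0 ((n - L : Nat) : Int) (n : Int)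
            (by positivity) (Nat.cast_le.mpr (by omega)),
          PySem.List.pyRange_one_cons (a := ((n - L : Nat) : Int)) (b := (n : Int))
            (Nat.cast_lt.mpr (by omega))]
      rw [hsplit, List.find?_append]
      have h1 : (PySem.List.pyRange 0 ((n - L : Nat) : Int) 1).find? (pvQ d) = none :=
        List.find?_eq_none.mpr hnone'
      rw [h1, Option.none_or, List.find?, hq0]
    rw [hfb]
    -- the candidate at index n - L is c itself
    have hcand : PySem.Str.slice d (some ((n - L : Nat) : Int)) none = c := by
      rw [← String.toList_inj, PySem.Str.toList_slice, PySem.Chars.slice_eq_listSlice,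
        PySem.List.slice_from _ (by omega)]
      simp [← hdropc]
    -- the two outputs coincide
    show pvAOut d c = pvBOut d ((n - L : Nat) : Int)
    by_cases hnl : n = L
    · -- whole-string match: both return ("", c)
      have hnL0 : ((n - L : Nat) : Int) = 0 := by omega
      have hends : PySem.Chars.endswith d.toList ('-' :: c.toList) = false := by
        rw [Bool.eq_false_iff]
        intro h
        have := ((PySem.Chars.endswith_iff _ _).mp h).length_le
        simp [← hn, ← hL] at this
        omega
      rw [hnL0] at hcand
      rw [pvAOut, hends, pvBOut, hnL0]
      simp [hcand]
    · -- proper suffix match: both return (prefix before the dash, c)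
      have hLn : L < n := by omega
      have hends : PySem.Chars.endswith d.toList ('-' :: c.toList) = true := by
        rcases Bool.or_eq_true_iff.mp hmc with h1 | h2
        · exact h1
        · exfalso
          have : d.toList = c.toList := by simpa using h2
          exact hnl (by rw [hn, hL, this])
      have hne0 : (((n - L : Nat) : Int) == 0) = false := by
        rw [beq_eq_false_iff_ne]; omega
      rw [pvAOut, hends, pvBOut, hne0, hcand]
      simp only [Bool.false_eq_true, if_false, if_true]
      have hfst : PySem.Str.slice d none (some (-(PySem.Str.len c) - 1))
          = PySem.Str.slice d none (some (((n - L : Nat) : Int) - 1)) := by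
        rw [← String.toList_inj, PySem.Str.toList_slice, PySem.Str.toList_slice,
          PySem.Chars.slice_eq_listSlice, PySem.Chars.slice_eq_listSlice]
        have hA : -(PySem.Str.len c) - 1 = -((L + 1 : Nat) : Int) := by
          rw [PySem.Str.len_eq, ← hL]; omega
        have hB : ((n - L : Nat) : Int) - 1 = ((n - L - 1 : Nat) : Int) := by omega
        rw [hA, hB, PySem.List.slice_to_neg_natCast _ _ (by omega),
          PySem.List.slice_to_natCast, ← hn]
        congr 1
      rw [hfst]

theorem extract_service_and_city_spec : Claim_equal_extract_service_and_city := by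
  intro dir_name _
  unfold Spec_extract_service_and_city extract_service_and_city extract_service_and_city_alt
  exact pvLoops_eq _
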